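-- pv_equiv track=rewrite | github.com/ChiuTeHao/Fakenews | landslide.py | merge_with_order
-- ===== SOURCE A (Python) =====
-- def merge_with_order(str_list, related_list):
--     str_list_1 = str_list[:]
--     idx = 0
--     while idx <len(str_list_1):
--         if str_list_1[idx][1] in related_list:
--             str_buf = str_list_1[idx][0]
--             while idx+1 < len(str_list_1):
--                 if str_list_1[idx+1][1] in related_list:
--                     str_buf += str_list_1[idx+1][0]
--                     del str_list_1[idx+1]
--                 else:
--                     break
--             str_list_1[idx:idx+1] = [(str_buf, str_list_1[idx][1])]
--         idx += 1
--     return str_list_1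
-- ===== SOURCE B (Python) =====
-- def merge_with_order(str_list, related_list):
--     related = set(related_list)
--     result = []
--     pending = None  # (accumulated_text, label_of_first_element) of the current related run
--     for text, label in str_list:
--         if label in related:
--             if pending is None:
--                 pending = (text, label)
--             else:
--                 pending = (pending[0] + text, pending[1])
--         else:
--             if pending is not None:
--                 result.append(pending)
--                 pending = None
--             result.append((text, label))
--     if pending is not None:
--         result.append(pending)
--     return result
-- ===== Notes on version B (the rewrite author's own statement) =====
-- stated objective: simpler
-- what changed: Replaces A's in-place nested while loops with del/slice-assignment on a copied list by a single forward pass that folds each run of related elements into a pending (text, label) accumulator flushed when the run ends.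
import Mathlib
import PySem

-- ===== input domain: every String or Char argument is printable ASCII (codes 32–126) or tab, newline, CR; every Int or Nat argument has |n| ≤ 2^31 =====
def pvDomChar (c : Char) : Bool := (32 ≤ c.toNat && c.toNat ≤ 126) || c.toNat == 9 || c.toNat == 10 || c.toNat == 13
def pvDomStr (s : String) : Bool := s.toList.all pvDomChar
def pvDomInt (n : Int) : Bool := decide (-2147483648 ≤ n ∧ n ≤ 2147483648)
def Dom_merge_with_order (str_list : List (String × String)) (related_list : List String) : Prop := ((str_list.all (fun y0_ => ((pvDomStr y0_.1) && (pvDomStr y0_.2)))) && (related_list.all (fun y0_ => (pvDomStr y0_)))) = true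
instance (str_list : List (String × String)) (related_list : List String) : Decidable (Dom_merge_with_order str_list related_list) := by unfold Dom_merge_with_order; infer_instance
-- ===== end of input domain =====

-- B merges each maximal run of related elements in one forward pass with a pending accumulator,
-- instead of A's in-place nested while loops with del / slice assignment (simpler, one pass).

-- ===== PORT A =====
-- inner while loop of A: while idx+1 < len(l): if l[idx+1][1] in related: buf += l[idx+1][0]; del l[idx+1] else break
-- (fuel = current list length bounds the iteration count; it only makes the recursion structural)
def mwoInner (fuel : Nat) (l : List (String × String)) (idx : Nat) (buf : String)
    (related_list : List String) : String × List (String × String) :=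
  match fuel with
  | 0 => (buf, l)
  | fuel + 1 =>
    if h : idx + 1 < l.length then
      if (l[idx + 1]).2 ∈ related_list then
        mwoInner fuel (l.eraseIdx (idx + 1)) idx (buf ++ (l[idx + 1]).1) related_list
      else (buf, l)
    else (buf, l)

-- outer while loop of A over (str_list_1, idx); fuel bounds the remaining iterations
def mwoOuter (fuel : Nat) (l : List (String × String)) (idx : Nat)
    (related_list : List String) : List (String × String) :=
  match fuel with
  | 0 => l
  | fuel + 1 =>
    if h : idx < l.length then
      if (l[idx]).2 ∈ related_list then
        -- str_list_1[idx:idx+1] = [(str_buf, str_list_1[idx][1])]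
        mwoOuter fuel
          ((mwoInner l.length l idx (l[idx]).1 related_list).2.take idx ++
            [((mwoInner l.length l idx (l[idx]).1 related_list).1,
              (((mwoInner l.length l idx (l[idx]).1 related_list).2)[idx]?.getD default).2)] ++
            (mwoInner l.length l idx (l[idx]).1 related_list).2.drop (idx + 1))
          (idx + 1) related_list
      else mwoOuter fuel l (idx + 1) related_list
    else l

def merge_with_order (str_list : List (String × String)) (related_list : List String) :
    List (String × String) :=
  mwoOuter str_list.length str_list 0 related_list

-- ===== PORT B =====
-- the for loop of B: state = (result, pending)
def mwoAltGo (xs : List (String × String)) (result : List (String × String))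
    (pending : Option (String × String)) (related : PySem.Set String) :
    List (String × String) :=
  match xs with
  | [] =>
    match pending with
    | some p => result ++ [p]
    | none => result
  | (text, label) :: rest =>
    if PySem.Set.contains related label then
      match pending with
      | none => mwoAltGo rest result (some (text, label)) related
      | some p => mwoAltGo rest result (some (p.1 ++ text, p.2)) related
    else
      match pending with
      | some p => mwoAltGo rest (result ++ [p] ++ [(text, label)]) none related
      | none => mwoAltGo rest (result ++ [(text, label)]) none related

def merge_with_order_alt (str_list : List (String × String)) (related_list : List String) :
    List (String × String) :=
  let related := PySem.Set.ofList related_list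
  mwoAltGo str_list [] none related

-- ===== PRECONDITION & SPEC =====
def Spec_merge_with_order (str_list : List (String × String)) (related_list : List String) (out : List (String × String)) : Prop := out = merge_with_order_alt str_list related_list
instance (str_list : List (String × String)) (related_list : List String) (out : List (String × String)) : Decidable (Spec_merge_with_order str_list related_list out) := by unfold Spec_merge_with_order; infer_instance

-- ===== CLAIM (what is proved, stated in full; the proofs are below) =====
def Claim_equal_merge_with_order : Prop := ∀ (str_list : List (String × String)) (related_list : List String), Dom_merge_with_order str_list related_list → Spec_merge_with_order str_list related_list (merge_with_order str_list related_list)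

-- ===== LEMMAS AND PROOFS =====

-- canonical recursion: G consumes the tail of a related run, F processes the whole list
def mwoG (buf : String) (rest : List (String × String)) (rel : List String) :
    String × List (String × String) :=
  match rest with
  | [] => (buf, [])
  | (t, lab) :: rest' =>
    if lab ∈ rel then mwoG (buf ++ t) rest' rel else (buf, (t, lab) :: rest')

theorem mwoG_length (buf : String) (rest : List (String × String)) (rel : List String) :
    (mwoG buf rest rel).2.length ≤ rest.length := by
  fun_induction mwoG buf rest rel with
  | case1 => simp
  | case2 b t lab r h ih => simpa using by omega
  | case3 => simp

def mwoF (xs : List (String × String)) (rel : List String) : List (String × String) :=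
  match xs with
  | [] => []
  | (t, lab) :: rest =>
    if lab ∈ rel then
      ((mwoG t rest rel).1, lab) :: mwoF (mwoG t rest rel).2 rel
    else (t, lab) :: mwoF rest rel
termination_by xs.length
decreasing_by
  · have := mwoG_length t rest rel; simp; omega
  · simp

theorem mwoInner_spec (rest : List (String × String)) : ∀ (fuel : Nat)
    (done : List (String × String)) (x : String × String) (buf : String) (rel : List String),
    rest.length ≤ fuel →
    mwoInner fuel (done ++ x :: rest) done.length buf rel =
      ((mwoG buf rest rel).1, done ++ x :: (mwoG buf rest rel).2) := by
  induction rest with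
  | nil =>
    intro fuel done x buf rel _
    match fuel with
    | 0 => simp [mwoInner, mwoG]
    | fuel + 1 =>
      rw [mwoInner]
      simp [mwoG]
  | cons e rest' ih =>
    intro fuel done x buf rel hf
    match fuel with
    | 0 => exact absurd hf (by simp)
    | fuel + 1 =>
      rw [mwoInner]
      have hlt : done.length + 1 < (done ++ x :: e :: rest').length := by simp
      have hget : (done ++ x :: e :: rest')[done.length + 1]'hlt = e := by
        have : (done ++ x :: e :: rest')[done.length + 1]? = some e := by
          rw [List.getElem?_append_right (by omega)]
          simp
        simpa [List.getElem?_eq_getElem hlt] using this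
      have herase : (done ++ x :: e :: rest').eraseIdx (done.length + 1) =
          done ++ x :: rest' := by
        rw [List.eraseIdx_append_of_length_le (by simp)]
        simp
      obtain ⟨t, lab⟩ := e
      simp only [hlt, hget, dif_pos, herase]
      by_cases hmem : lab ∈ rel
      · simp only [hmem, if_pos]
        rw [ih fuel done x (buf ++ t) rel (by simp at hf ⊢; omega)]
        simp [mwoG, hmem]
      · simp [hmem, mwoG]

theorem mwoOuter_spec (n : Nat) : ∀ (todo done : List (String × String)) (fuel : Nat)
    (rel : List String), todo.length ≤ n → todo.length ≤ fuel →
    mwoOuter fuel (done ++ todo) done.length rel = done ++ mwoF todo rel := by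
  induction n with
  | zero =>
    intro todo done fuel rel hn hf
    have : todo = [] := List.eq_nil_of_length_eq_zero (by omega)
    subst this
    match fuel with
    | 0 => simp [mwoOuter, mwoF]
    | fuel + 1 =>
      rw [mwoOuter]
      simp [mwoF]
  | succ n ih =>
    intro todo done fuel rel hn hf
    match todo with
    | [] =>
      match fuel with
      | 0 => simp [mwoOuter, mwoF]
      | fuel + 1 =>
        rw [mwoOuter]
        simp [mwoF]
    | (t, lab) :: rest =>
      match fuel with
      | 0 => exact absurd hf (by simp)
      | fuel + 1 =>
        rw [mwoOuter]
        have hlt : done.length < (done ++ (t, lab) :: rest).length := by simp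
        have hget : (done ++ (t, lab) :: rest)[done.length]'hlt = (t, lab) := by
          have : (done ++ (t, lab) :: rest)[done.length]? = some (t, lab) := by
            rw [List.getElem?_append_right (by omega)]
            simp
          simpa [List.getElem?_eq_getElem hlt] using this
        simp only [hlt, dif_pos, hget]
        by_cases hmem : lab ∈ rel
        · simp only [hmem, if_pos]
          rw [mwoInner_spec rest (done ++ (t, lab) :: rest).length done (t, lab) t rel
            (by simp; omega)]
          have hg := mwoG_length t rest rel
          have hgetd : ((done ++ (t, lab) :: (mwoG t rest rel).2)[done.length]?.getD default) =
              (t, lab) := by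
            rw [List.getElem?_append_right (by omega)]
            simp
          have htake : (done ++ (t, lab) :: (mwoG t rest rel).2).take done.length = done := by
            simp
          have hdrop : (done ++ (t, lab) :: (mwoG t rest rel).2).drop (done.length + 1) =
              (mwoG t rest rel).2 := by
            simp [List.drop_append]
          simp only [hgetd, htake, hdrop]
          have hstep := ih (mwoG t rest rel).2 (done ++ [((mwoG t rest rel).1, lab)]) fuel rel
            (by simp at hn; omega) (by simp at hf; omega)
          have hre : done ++ [((mwoG t rest rel).1, lab)] ++ (mwoG t rest rel).2 =
              (done ++ [((mwoG t rest rel).1, lab)]) ++ (mwoG t rest rel).2 := by simp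
          have hlen : (done ++ [((mwoG t rest rel).1, lab)]).length = done.length + 1 := by simp
          rw [hlen] at hstep
          rw [← hre] at hstep
          rw [hstep]
          rw [mwoF]
          simp [hmem]
        · simp only [hmem, if_neg, not_false_iff]
          have hstep := ih rest (done ++ [(t, lab)]) fuel rel
            (by simp at hn; omega) (by simp at hf; omega)
          have hlen : (done ++ [(t, lab)]).length = done.length + 1 := by simp
          rw [hlen] at hstep
          rw [show (done ++ [(t, lab)]) ++ rest = done ++ (t, lab) :: rest from by simp] at hstep
          rw [hstep]
          rw [mwoF]
          simp [hmem]

theorem mwoAltGo_spec (n : Nat) (xs res : List (String × String))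
    (pending : Option (String × String)) (rel : List String) (hn : xs.length ≤ n) :
    mwoAltGo xs res pending (PySem.Set.ofList rel) =
      res ++ (match pending with
        | none => mwoF xs rel
        | some p => ((mwoG p.1 xs rel).1, p.2) :: mwoF (mwoG p.1 xs rel).2 rel) := by
  induction n generalizing xs res pending with
  | zero =>
    have : xs = [] := List.eq_nil_of_length_eq_zero (by omega)
    subst this
    cases pending with
    | none => simp [mwoAltGo, mwoF]
    | some p => simp [mwoAltGo, mwoF, mwoG]
  | succ n ih =>
    match xs with
    | [] =>
      cases pending with
      | none => simp [mwoAltGo, mwoF]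
      | some p => simp [mwoAltGo, mwoF, mwoG]
    | (t, lab) :: rest =>
      have hcont : PySem.Set.contains (PySem.Set.ofList rel) lab = (lab ∈ rel) := by
        simp [PySem.Set.mem_ofList]
      by_cases hmem : lab ∈ rel
      · cases pending with
        | none =>
          rw [mwoAltGo]
          simp only [hcont, hmem, if_true]
          rw [ih rest res (some (t, lab)) (by simp at hn ⊢; omega)]
          rw [mwoF]
          simp [hmem]
        | some p =>
          rw [mwoAltGo]
          simp only [hcont, hmem, if_true]
          rw [ih rest res (some (p.1 ++ t, p.2)) (by simp at hn ⊢; omega)]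
          have : mwoG p.1 ((t, lab) :: rest) rel = mwoG (p.1 ++ t) rest rel := by
            rw [mwoG]; simp [hmem]
          rw [this]
      · cases pending with
        | none =>
          rw [mwoAltGo]
          simp only [hcont, hmem, if_false]
          rw [ih rest _ none (by simp at hn ⊢; omega)]
          rw [mwoF]
          simp [hmem]
        | some p =>
          rw [mwoAltGo]
          simp only [hcont, hmem, if_false]
          rw [ih rest _ none (by simp at hn ⊢; omega)]
          have : mwoG p.1 ((t, lab) :: rest) rel = (p.1, (t, lab) :: rest) := by
            rw [mwoG]; simp [hmem]
          rw [this, mwoF]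
          simp [hmem]

-- ===== VERDICT (by name: the statement is the Claim_ definition above) =====
theorem merge_with_order_spec : Claim_equal_merge_with_order := by
  intro str_list related_list _
  unfold Spec_merge_with_order merge_with_order merge_with_order_alt
  have hA := mwoOuter_spec str_list.length str_list [] str_list.length related_list
    (le_refl _) (le_refl _)
  have hB := mwoAltGo_spec str_list.length str_list [] none related_list (le_refl _)
  simpa using hA.trans (by simpa using hB.symm)
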